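-- pv_equiv track=rewrite | github.com/Bill-Fujimoto/Intro-to-Scripting--Data-Representations | 04.06 Project - File Differences.py | multiline_diff
-- ===== SOURCE A (Python) =====
-- IDENTICAL = -1
--
-- def singleline_diff(line1, line2):
--     """
--     Inputs:
--       line1 - first single line string
--       line2 - second single line string
--     Output:
--       Returns the index where the first difference between
--       line1 and line2 occurs.
--
--       Returns IDENTICAL if the two lines are the same.
--     """
--     if len(line1)>= len(line2):
--         len_min = len(line2)
--     else:
--         len_min = len(line1)
--
--     for ind in range(0, len_min + 1):
--         if line1[:ind + 1] == line2[:ind + 1]: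
--             continue
--         else:
--             return ind
--
--     return IDENTICAL
--
-- def multiline_diff(lines1, lines2):
--     """
--     Inputs:
--       lines1 - list of single line strings
--       lines2 - list of single line strings
--     Output:
--       Returns a tuple containing the line number (starting from 0) and
--       the index in that line where the first difference between lines1
--       and lines2 occurs.
--
--       Returns (IDENTICAL, IDENTICAL) if the two lists are the same.
--     """
--     equal_lines = False
--
--     if len(lines1)==len(lines2):
--         len_min = len(lines1)
--         equal_lines = True
--     elif len(lines1) > len(lines2):
--         len_min = len(lines2)
--     else:
--         len_min = len(lines1)
--
--     for ind in range(0, len_min):  #check each line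
--         diff_index = singleline_diff(lines1[ind], lines2[ind])
--         if diff_index == IDENTICAL:
--             continue
--         else:
--             return ind, diff_index
--     if equal_lines is True:
--         return (IDENTICAL, IDENTICAL)
--     else:
--         return (len_min, 0)
-- ===== SOURCE B (Python) =====
-- IDENTICAL = -1
--
-- def multiline_diff(lines1, lines2):
--     for ind, (l1, l2) in enumerate(zip(lines1, lines2)):
--         col = next((i for i, (a, b) in enumerate(zip(l1, l2)) if a != b), None)
--         if col is not None:
--             return ind, col
--         if len(l1) != len(l2):
--             return ind, min(len(l1), len(l2))
--     if len(lines1) == len(lines2):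
--         return IDENTICAL, IDENTICAL
--     return min(len(lines1), len(lines2)), 0
-- ===== Notes on version B (the rewrite author's own statement) =====
-- stated objective: simpler
-- what changed: Replaces the slice-comparing helper singleline_diff (which re-compares growing prefixes line1[:ind+1] on every step, quadratic per line) and the index-based outer loop with a single pass over zip(lines1, lines2) that finds the first differing column by one direct character scan per line.
import Mathlib
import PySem

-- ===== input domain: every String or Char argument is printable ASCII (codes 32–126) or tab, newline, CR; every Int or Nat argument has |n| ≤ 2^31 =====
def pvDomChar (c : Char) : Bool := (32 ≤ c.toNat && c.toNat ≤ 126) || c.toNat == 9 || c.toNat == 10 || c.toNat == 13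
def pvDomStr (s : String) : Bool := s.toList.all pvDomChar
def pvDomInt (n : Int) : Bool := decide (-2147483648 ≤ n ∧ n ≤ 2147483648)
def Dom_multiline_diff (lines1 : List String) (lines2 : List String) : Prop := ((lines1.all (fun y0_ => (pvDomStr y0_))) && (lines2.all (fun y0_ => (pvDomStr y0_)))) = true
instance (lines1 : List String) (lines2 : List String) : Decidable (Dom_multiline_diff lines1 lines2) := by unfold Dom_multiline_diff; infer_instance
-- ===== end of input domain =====

-- B replaces the slice-comparing helper loop by a single pass over zipped lines with a direct
-- per-line character scan (simpler decomposition; return value only, neither program mutates input).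

-- ===== PORT A =====
-- the 'for ind in range(0, len_min + 1)' loop of singleline_diff: second Nat is the number of
-- remaining iterations (len_min + 1 at the call), first is the current index 'ind';
-- line[:ind+1] with a nonnegative bound is List.take (ind+1).
def sld_loop (l1 l2 : List Char) : Nat → Nat → Int
  | _, 0 => -1                                   -- loop ends: return IDENTICAL
  | ind, rem + 1 =>
    if l1.take (ind + 1) = l2.take (ind + 1) then sld_loop l1 l2 (ind + 1) rem
    else (ind : Int)

def singleline_diff (line1 line2 : String) : Int :=
  let l1 := line1.toList
  let l2 := line2.toList
  let len_min := if l1.length ≥ l2.length then l2.length else l1.length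
  sld_loop l1 l2 0 (len_min + 1)

-- the 'for ind in range(0, len_min)' loop of multiline_diff; lines[ind] is always in range here
-- (ind < len_min ≤ both lengths), so getD is exact for Python's lines1[ind].
def mld_loop (lines1 lines2 : List String) : Nat → Nat → Option (Nat × Int)
  | _, 0 => none
  | ind, rem + 1 =>
    let d := singleline_diff (lines1.getD ind "") (lines2.getD ind "")
    if d = -1 then mld_loop lines1 lines2 (ind + 1) rem
    else some (ind, d)

def multiline_diff (lines1 : List String) (lines2 : List String) : List Int :=
  let p : Nat × Bool :=
    if lines1.length = lines2.length then (lines1.length, true)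
    else if lines1.length > lines2.length then (lines2.length, false)
    else (lines1.length, false)
  match mld_loop lines1 lines2 0 p.1 with
  | some (ind, d) => [(ind : Int), d]
  | none => if p.2 then [-1, -1] else [(p.1 : Int), 0]

-- ===== PORT B =====
-- 'next((i for i, (a, b) in enumerate(zip(l1, l2)) if a != b), None)'
def firstDiffCol : List Char → List Char → Nat → Option Nat
  | a :: as, b :: bs, i => if a ≠ b then some i else firstDiffCol as bs (i + 1)
  | _, _, _ => none

-- 'for ind, (l1, l2) in enumerate(zip(lines1, lines2))'; n1, n2 are len(lines1), len(lines2)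
def mlb_loop (xs ys : List String) (ind n1 n2 : Nat) : List Int :=
  match xs, ys with
  | x :: xs', y :: ys' =>
    match firstDiffCol x.toList y.toList 0 with
    | some col => [(ind : Int), (col : Int)]
    | none =>
      if x.toList.length ≠ y.toList.length then
        [(ind : Int), ((min x.toList.length y.toList.length : Nat) : Int)]
      else mlb_loop xs' ys' (ind + 1) n1 n2
  | _, _ => if n1 = n2 then [-1, -1] else [((min n1 n2 : Nat) : Int), 0]

def multiline_diff_alt (lines1 : List String) (lines2 : List String) : List Int :=
  mlb_loop lines1 lines2 0 lines1.length lines2.length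

-- ===== PRECONDITION & SPEC =====
def Spec_multiline_diff (lines1 : List String) (lines2 : List String) (out : List Int) : Prop := out = multiline_diff_alt lines1 lines2
instance (lines1 : List String) (lines2 : List String) (out : List Int) : Decidable (Spec_multiline_diff lines1 lines2 out) := by unfold Spec_multiline_diff; infer_instance

-- ===== CLAIM (what is proved, stated in full; the proofs are below) =====
def Claim_equal_multiline_diff : Prop := ∀ (lines1 : List String) (lines2 : List String), Dom_multiline_diff lines1 lines2 → Spec_multiline_diff lines1 lines2 (multiline_diff lines1 lines2)

-- ===== LEMMAS AND PROOFS =====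

-- shifting the scan of A's inner loop past an equal pair of head characters
theorem sld_shift (c : Char) (l1 l2 : List Char) :
    ∀ (rem ind : Nat), sld_loop (c :: l1) (c :: l2) (ind + 1) rem =
      (if sld_loop l1 l2 ind rem = -1 then -1 else sld_loop l1 l2 ind rem + 1) := by
  intro rem
  induction rem with
  | zero => intro ind; simp [sld_loop]
  | succ n ih =>
    intro ind
    simp only [sld_loop, List.take_succ_cons, List.cons.injEq, true_and]
    split
    · exact ih (ind + 1)
    · have : ((ind : Int)) ≠ -1 := by omega
      simp [this]

theorem firstDiffCol_shift (l1 : List Char) :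
    ∀ (l2 : List Char) (i : Nat),
      firstDiffCol l1 l2 i = (firstDiffCol l1 l2 0).map (· + i) := by
  induction l1 with
  | nil => intro l2 i; cases l2 <;> simp [firstDiffCol]
  | cons a as ih =>
    intro l2 i
    cases l2 with
    | nil => simp [firstDiffCol]
    | cons b bs =>
      by_cases h : a = b
      · simp only [firstDiffCol, h, ne_eq, not_true_eq_false, if_false]
        rw [ih bs (i + 1), ih bs 1, Option.map_map]
        cases firstDiffCol as bs 0 with
        | none => simp
        | some k => simp; omega
      · simp [firstDiffCol, h]

-- A's singleline_diff, characterised by B's per-line scan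
theorem single_eq (l1 : List Char) :
    ∀ l2 : List Char,
      sld_loop l1 l2 0 (min l1.length l2.length + 1) =
        (match firstDiffCol l1 l2 0 with
         | some col => (col : Int)
         | none => if l1.length = l2.length then -1
                   else ((min l1.length l2.length : Nat) : Int)) := by
  induction l1 with
  | nil =>
    intro l2
    cases l2 with
    | nil => simp [sld_loop, firstDiffCol]
    | cons b bs => simp [sld_loop, firstDiffCol]
  | cons a as ih =>
    intro l2
    cases l2 with
    | nil => simp [sld_loop, firstDiffCol]
    | cons b bs =>
      by_cases h : a = b
      · subst h
        have hm : min (a :: as).length (a :: bs).length + 1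
            = (min as.length bs.length + 1) + 1 := by
          simp [List.length_cons]
        rw [hm]
        show (if (a :: as).take 1 = (a :: bs).take 1 then
                sld_loop (a :: as) (a :: bs) 1 (min as.length bs.length + 1)
              else (0 : Int)) = _
        simp only [List.take_succ_cons, List.take_zero]
        rw [sld_shift a as bs (min as.length bs.length + 1) 0, ih bs]
        have hfd : firstDiffCol (a :: as) (a :: bs) 0
            = (firstDiffCol as bs 0).map (· + 1) := by
          simp only [firstDiffCol, ne_eq, not_true_eq_false, if_false]
          exact firstDiffCol_shift as bs 1
        rw [hfd]
        cases hc : firstDiffCol as bs 0 with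
        | some col =>
          have : ((col : Int)) ≠ -1 := by omega
          simp [this]
        | none =>
          by_cases hl : as.length = bs.length
          · simp [hl]
          · have h1 : (a :: as).length ≠ (a :: bs).length := by
              simp only [List.length_cons]; omega
            have h2 : ((min as.length bs.length : Nat) : Int) ≠ -1 := by omega
            simp only [Option.map_none, hl, if_false, h1, h2]
            simp [List.length_cons]
      · show (if (a :: as).take 1 = (b :: bs).take 1 then _ else ((0 : Nat) : Int)) = _
        simp [firstDiffCol, h]

-- skipping an identical head pair of lines in A's outer loop
theorem mld_shift (x y : String) (xs ys : List String) :
    ∀ (rem ind : Nat), mld_loop (x :: xs) (y :: ys) (ind + 1) rem =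
      (mld_loop xs ys ind rem).map (fun p => (p.1 + 1, p.2)) := by
  intro rem
  induction rem with
  | zero => intro ind; simp [mld_loop]
  | succ n ih =>
    intro ind
    simp only [mld_loop, List.getD_cons_succ]
    split
    · exact ih (ind + 1)
    · simp

-- A's outer loop equals B's recursion over the zipped lists
theorem loop_eq (xs : List String) :
    ∀ (ys : List String) (ind n1 n2 : Nat),
      mlb_loop xs ys ind n1 n2 =
        (match mld_loop xs ys 0 (min xs.length ys.length) with
         | some (i, d) => [((i + ind : Nat) : Int), d]
         | none => if n1 = n2 then [-1, -1] else [((min n1 n2 : Nat) : Int), 0]) := by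
  induction xs with
  | nil => intro ys ind n1 n2; cases ys <;> simp [mlb_loop, mld_loop]
  | cons x xs' ih =>
    intro ys ind n1 n2
    cases ys with
    | nil => simp [mlb_loop, mld_loop]
    | cons y ys' =>
      have hm : min (x :: xs').length (y :: ys').length
          = min xs'.length ys'.length + 1 := by
        simp [List.length_cons]
      have hd : singleline_diff x y =
          (match firstDiffCol x.toList y.toList 0 with
           | some col => (col : Int)
           | none => if x.toList.length = y.toList.length then -1
                     else ((min x.toList.length y.toList.length : Nat) : Int)) := by
        have hmin : (if x.toList.length ≥ y.toList.length then y.toList.length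
            else x.toList.length) = min x.toList.length y.toList.length := by
          split <;> omega
        simp only [singleline_diff]
        rw [hmin, single_eq x.toList y.toList]
      rw [hm]
      cases hc : firstDiffCol x.toList y.toList 0 with
      | some col =>
        have hd' : singleline_diff x y = (col : Int) := by rw [hd, hc]
        have hne : ((col : Int)) ≠ -1 := by omega
        have hstep : mld_loop (x :: xs') (y :: ys') 0 (min xs'.length ys'.length + 1)
            = some (0, (col : Int)) := by
          simp only [mld_loop, List.getD_cons_zero, hd', if_neg hne]
        rw [hstep]
        simp [mlb_loop, hc]
      | none =>
        by_cases hl : x.toList.length = y.toList.length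
        · have hd' : singleline_diff x y = -1 := by
            rw [hd, hc]; exact if_pos hl
          have hstep : mld_loop (x :: xs') (y :: ys') 0 (min xs'.length ys'.length + 1)
              = (mld_loop xs' ys' 0 (min xs'.length ys'.length)).map
                  (fun p => (p.1 + 1, p.2)) := by
            simp only [mld_loop, List.getD_cons_zero, hd']
            exact mld_shift x y xs' ys' (min xs'.length ys'.length) 0
          rw [hstep]
          have hb : mlb_loop (x :: xs') (y :: ys') ind n1 n2
              = mlb_loop xs' ys' (ind + 1) n1 n2 := by
            simp only [mlb_loop, hc]
            exact if_neg (by simpa using hl)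
          rw [hb, ih ys' (ind + 1) n1 n2]
          cases mld_loop xs' ys' 0 (min xs'.length ys'.length) with
          | none => simp
          | some p =>
            simp only [Option.map_some]
            have : p.1 + (ind + 1) = p.1 + 1 + ind := by omega
            rw [this]
        · have hd' : singleline_diff x y
              = ((min x.toList.length y.toList.length : Nat) : Int) := by
            rw [hd, hc]; exact if_neg hl
          have hne : ((min x.toList.length y.toList.length : Nat) : Int) ≠ -1 := by omega
          have hstep : mld_loop (x :: xs') (y :: ys') 0 (min xs'.length ys'.length + 1)
              = some (0, ((min x.toList.length y.toList.length : Nat) : Int)) := by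
            simp only [mld_loop, List.getD_cons_zero, hd', if_neg hne]
          rw [hstep]
          simp only [mlb_loop, hc]
          rw [if_pos hl]
          simp

-- ===== VERDICT (by name: the statement is the Claim_ definition above) =====
theorem multiline_diff_spec : Claim_equal_multiline_diff := by
  intro lines1 lines2 _
  show multiline_diff lines1 lines2 = multiline_diff_alt lines1 lines2
  simp only [multiline_diff, multiline_diff_alt]
  rw [loop_eq lines1 lines2 0 lines1.length lines2.length]
  by_cases h1 : lines1.length = lines2.length
  · have hmin : min lines1.length lines2.length = lines1.length := by omega
    rw [hmin]
    simp only [if_pos h1]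
    rcases hres : mld_loop lines1 lines2 0 lines1.length with _ | ⟨i, d⟩ <;>
      simp [hres, h1]
  · by_cases h2 : lines1.length > lines2.length
    · have hmin : min lines1.length lines2.length = lines2.length := by omega
      rw [hmin]
      simp only [if_neg h1, if_pos h2]
      rcases hres : mld_loop lines1 lines2 0 lines2.length with _ | ⟨i, d⟩ <;>
        simp [hres, h1]
    · have hmin : min lines1.length lines2.length = lines1.length := by omega
      rw [hmin]
      simp only [if_neg h1, if_neg h2]
      rcases hres : mld_loop lines1 lines2 0 lines1.length with _ | ⟨i, d⟩ <;>
        simp [hres, h1]
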